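-- pv_equiv track=rewrite | github.com/kanatakayasu/apriori-window | apriori_window_suite/python/apriori_window_basket.py | compute_item_basket_map
-- ===== SOURCE A (Python) =====
-- from typing import Dict, List, Optional, Sequence, Tuple
--
-- def compute_item_basket_map(
--     transactions: List[List[List[int]]],
-- ) -> Tuple[Dict[int, List[int]], List[int], Dict[int, List[int]]]:
--     """
--     アイテムのバスケット情報マップを構築する。
--
--     basket_id 採番規則:
--         トランザクション順 × バスケット順でグローバル連番
--         → basket_to_transaction は単調非減少になる
--
--     返り値:
--         item_basket_map: Dict[item, List[basket_id]]
--             アイテム → 出現basket_idリスト（ソート済み・一意）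
--             ※ 同一バスケット内に同じアイテムが複数あっても1回のみ記録
--
--         basket_to_transaction: List[int]
--             basket_to_transaction[basket_id] = transaction_id
--
--         item_transaction_map: Dict[item, List[int]]
--             アイテム → 出現transaction_idリスト（重複なし・ソート済み）
--             ※ 単体アイテムの dense interval 計算と singleton_intervals に使う
--     """
--     item_basket_map: Dict[int, List[int]] = {}
--     basket_to_transaction: List[int] = []
--     item_transaction_map: Dict[int, List[int]] = {}
--
--     basket_id = 0
--     for t_id, baskets in enumerate(transactions):
--         seen_in_transaction: set = set()
--         for basket in baskets:
--             seen_in_basket: set = set()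
--             basket_to_transaction.append(t_id)
--             for item in basket:
--                 if item not in seen_in_basket:
--                     seen_in_basket.add(item)
--                     item_basket_map.setdefault(item, []).append(basket_id)
--                 if item not in seen_in_transaction:
--                     seen_in_transaction.add(item)
--                     item_transaction_map.setdefault(item, []).append(t_id)
--             basket_id += 1
--
--     return item_basket_map, basket_to_transaction, item_transaction_map
-- ===== SOURCE B (Python) =====
-- from typing import Dict, List, Tuple
--
-- def compute_item_basket_map(
--     transactions: List[List[List[int]]],
-- ) -> Tuple[Dict[int, List[int]], List[int], Dict[int, List[int]]]:
--     # Three independent passes instead of one nested loop with shared counters/seen-sets.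
--     basket_to_transaction = [t_id for t_id, baskets in enumerate(transactions) for _ in baskets]
--
--     item_basket_map: Dict[int, List[int]] = {}
--     for basket_id, basket in enumerate(b for baskets in transactions for b in baskets):
--         for item in dict.fromkeys(basket):  # ordered dedup within the basket
--             item_basket_map.setdefault(item, []).append(basket_id)
--
--     item_transaction_map: Dict[int, List[int]] = {}
--     for t_id, baskets in enumerate(transactions):
--         for item in dict.fromkeys(i for b in baskets for i in b):  # ordered union per transaction
--             item_transaction_map.setdefault(item, []).append(t_id)
--
--     return item_basket_map, basket_to_transaction, item_transaction_map
-- ===== Notes on version B (the rewrite author's own statement) =====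
-- stated objective: alternative
-- what changed: Replaces A's single nested loop with shared mutable state (global basket_id counter, per-basket and per-transaction seen-sets threaded through one pass) by three independent passes: a flat comprehension for basket_to_transaction, an enumerate over the flattened basket stream with per-basket ordered dedup (dict.fromkeys) for item_basket_map, and a per-transaction ordered union for item_transaction_map.
import Mathlib
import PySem

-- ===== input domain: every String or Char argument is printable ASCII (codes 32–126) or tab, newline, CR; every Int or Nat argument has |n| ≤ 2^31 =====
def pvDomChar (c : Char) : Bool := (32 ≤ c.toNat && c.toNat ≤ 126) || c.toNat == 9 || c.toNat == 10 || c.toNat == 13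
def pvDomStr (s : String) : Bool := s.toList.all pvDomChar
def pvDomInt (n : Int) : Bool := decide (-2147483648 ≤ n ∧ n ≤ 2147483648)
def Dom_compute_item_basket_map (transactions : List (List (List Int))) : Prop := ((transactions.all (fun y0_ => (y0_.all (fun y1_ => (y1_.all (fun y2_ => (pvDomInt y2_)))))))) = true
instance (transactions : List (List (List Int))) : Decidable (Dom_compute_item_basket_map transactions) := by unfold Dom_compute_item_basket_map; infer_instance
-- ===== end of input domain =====

-- B rebuilds the three results in three independent passes (flat comprehension, enumerate over the
-- flattened basket stream with per-basket dedup, per-transaction ordered union) instead of A's one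
-- nested loop with a shared basket_id counter and seen-sets; same outputs, proved equal below.

-- ===== PORT A =====
-- innermost `for item in basket` body: state = (item_basket_map, item_transaction_map, seen_in_transaction, seen_in_basket)
def aItemStep (bid tid : Int)
    (st : PySem.Dict Int (List Int) × PySem.Dict Int (List Int) × PySem.Set Int × PySem.Set Int)
    (item : Int) :
    PySem.Dict Int (List Int) × PySem.Dict Int (List Int) × PySem.Set Int × PySem.Set Int :=
  match st with
  | (ibm, itm, seenT, seenB) =>
    let p1 := if PySem.Set.contains seenB item then (ibm, seenB)
              else (PySem.Dict.modify ibm item [] (fun l => l ++ [bid]), PySem.Set.add seenB item)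
    let p2 := if PySem.Set.contains seenT item then (itm, seenT)
              else (PySem.Dict.modify itm item [] (fun l => l ++ [tid]), PySem.Set.add seenT item)
    (p1.1, p2.1, p2.2, p1.2)

-- `for basket in baskets` body: state = (item_basket_map, basket_to_transaction, item_transaction_map, basket_id, seen_in_transaction)
def aBasketStep (tid : Int)
    (st : PySem.Dict Int (List Int) × List Int × PySem.Dict Int (List Int) × Int × PySem.Set Int)
    (basket : List Int) :
    PySem.Dict Int (List Int) × List Int × PySem.Dict Int (List Int) × Int × PySem.Set Int :=
  match st with
  | (ibm, btt, itm, bid, seenT) =>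
    let btt' := btt ++ [tid]
    let r := basket.foldl (aItemStep bid tid) (ibm, itm, seenT, PySem.Set.empty)
    (r.1, btt', r.2.1, bid + 1, r.2.2.1)

-- `for t_id, baskets in enumerate(transactions)` body: seen_in_transaction starts empty each transaction
def aTransStep
    (st : PySem.Dict Int (List Int) × List Int × PySem.Dict Int (List Int) × Int)
    (tb : Int × List (List Int)) :
    PySem.Dict Int (List Int) × List Int × PySem.Dict Int (List Int) × Int :=
  match st with
  | (ibm, btt, itm, bid) =>
    let r := tb.2.foldl (aBasketStep tb.1) (ibm, btt, itm, bid, PySem.Set.empty)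
    (r.1, r.2.1, r.2.2.1, r.2.2.2.1)

def compute_item_basket_map (transactions : List (List (List Int))) :
    (List (Int × List Int)) × List Int × (List (Int × List Int)) :=
  let f := (PySem.List.enumerate transactions 0).foldl aTransStep
    (PySem.Dict.empty, [], PySem.Dict.empty, 0)
  (f.1.items, f.2.1, f.2.2.1.items)

-- ===== PORT B =====
-- `d.setdefault(item, []).append(tid)`
def bAppend (tid : Int) (d : PySem.Dict Int (List Int)) (item : Int) : PySem.Dict Int (List Int) :=
  PySem.Dict.modify d item [] (fun l => l ++ [tid])

def compute_item_basket_map_alt (transactions : List (List (List Int))) :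
    (List (Int × List Int)) × List Int × (List (Int × List Int)) :=
  -- [t_id for t_id, baskets in enumerate(transactions) for _ in baskets]
  let btt := (PySem.List.enumerate transactions 0).flatMap (fun tb => tb.2.map (fun _ => tb.1))
  -- for basket_id, basket in enumerate(flattened baskets): for item in dict.fromkeys(basket): append
  let ibm := (PySem.List.enumerate (transactions.flatMap id) 0).foldl
    (fun d p => (PySem.List.dedup p.2).foldl (bAppend p.1) d) PySem.Dict.empty
  -- for t_id, baskets in enumerate(transactions): for item in dict.fromkeys(flattened items): append
  let itm := (PySem.List.enumerate transactions 0).foldl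
    (fun d tb => (PySem.List.dedup (tb.2.flatMap id)).foldl (bAppend tb.1) d) PySem.Dict.empty
  (ibm.items, btt, itm.items)

-- ===== PRECONDITION & SPEC =====
def Spec_compute_item_basket_map (transactions : List (List (List Int))) (out : (List (Int × List Int)) × List Int × (List (Int × List Int))) : Prop := out = compute_item_basket_map_alt transactions
instance (transactions : List (List (List Int))) (out : (List (Int × List Int)) × List Int × (List (Int × List Int))) : Decidable (Spec_compute_item_basket_map transactions out) := by unfold Spec_compute_item_basket_map; infer_instance

-- ===== CLAIM (what is proved, stated in full; the proofs are below) =====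
def Claim_equal_compute_item_basket_map : Prop := ∀ (transactions : List (List (List Int))), Dom_compute_item_basket_map transactions → Spec_compute_item_basket_map transactions (compute_item_basket_map transactions)

-- ===== LEMMAS AND PROOFS =====

-- elements of xs not yet in the seen-set s, first occurrences only, in order
def newOf (s : PySem.Set Int) : List Int → List Int
  | [] => []
  | x :: r => if PySem.Set.contains s x then newOf s r else x :: newOf (PySem.Set.add s x) r

lemma update_cons (s : PySem.Set Int) (x : Int) (r : List Int) :
    PySem.Set.update s (x :: r) = PySem.Set.update (PySem.Set.add s x) r := by
  simp [PySem.Set.update]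

lemma update_eq_append_newOf (xs : List Int) (s : PySem.Set Int) :
    PySem.Set.update s xs = s ++ newOf s xs := by
  induction xs generalizing s with
  | nil => simp [PySem.Set.update, newOf]
  | cons x r ih =>
    rw [update_cons]
    by_cases h : x ∈ s
    · have ha : PySem.Set.add s x = s := by simp [PySem.Set.add, h]
      rw [ha, ih]; simp [newOf, h]
    · have ha : PySem.Set.add s x = s ++ [x] := by simp [PySem.Set.add, h]
      rw [ih]; simp [newOf, h]

lemma newOf_nil (xs : List Int) : newOf ([] : PySem.Set Int) xs = PySem.Set.ofList xs := by
  have h := update_eq_append_newOf xs ([] : PySem.Set Int)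
  simp [PySem.Set.update] at h
  rw [PySem.Set.ofList_eq_foldl, ← h]

lemma newOf_append (xs ys : List Int) (s : PySem.Set Int) :
    newOf s (xs ++ ys) = newOf s xs ++ newOf (PySem.Set.update s xs) ys := by
  induction xs generalizing s with
  | nil => simp [newOf, PySem.Set.update]
  | cons x r ih =>
    by_cases h : x ∈ s
    · have ha : PySem.Set.add s x = s := by simp [PySem.Set.add, h]
      simp [newOf, h, ih]
    · simp [newOf, h, ih]

lemma update_append (xs ys : List Int) (s : PySem.Set Int) :
    PySem.Set.update s (xs ++ ys) = PySem.Set.update (PySem.Set.update s xs) ys := by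
  simp [PySem.Set.update, List.foldl_append]

lemma itemFold (bid tid : Int) (xs : List Int)
    (ibm itm : PySem.Dict Int (List Int)) (seenT seenB : PySem.Set Int) :
    xs.foldl (aItemStep bid tid) (ibm, itm, seenT, seenB) =
      ((newOf seenB xs).foldl (bAppend bid) ibm,
       (newOf seenT xs).foldl (bAppend tid) itm,
       PySem.Set.update seenT xs,
       PySem.Set.update seenB xs) := by
  induction xs generalizing ibm itm seenT seenB with
  | nil => simp [newOf, PySem.Set.update]
  | cons x r ih =>
    rw [List.foldl_cons]
    by_cases hB : x ∈ seenB <;> by_cases hT : x ∈ seenT <;>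
      simp [aItemStep, hB, hT, ih, newOf, bAppend, PySem.Set.add]

lemma basketFold (tid : Int) (bs : List (List Int))
    (ibm : PySem.Dict Int (List Int)) (btt : List Int) (itm : PySem.Dict Int (List Int))
    (bid : Int) (seenT : PySem.Set Int) :
    bs.foldl (aBasketStep tid) (ibm, btt, itm, bid, seenT) =
      ((PySem.List.enumerate bs bid).foldl
         (fun d p => (PySem.List.dedup p.2).foldl (bAppend p.1) d) ibm,
       btt ++ bs.map (fun _ => tid),
       (newOf seenT (bs.flatMap id)).foldl (bAppend tid) itm,
       bid + bs.length,
       PySem.Set.update seenT (bs.flatMap id)) := by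
  induction bs generalizing ibm btt itm bid seenT with
  | nil => simp [PySem.List.enumerate_nil, newOf, PySem.Set.update]
  | cons b rest ih =>
    rw [List.foldl_cons]
    have hstep : aBasketStep tid (ibm, btt, itm, bid, seenT) b =
        ((PySem.List.dedup b).foldl (bAppend bid) ibm,
         btt ++ [tid],
         (newOf seenT b).foldl (bAppend tid) itm,
         bid + 1,
         PySem.Set.update seenT b) := by
      simp [aBasketStep, itemFold, newOf_nil]
    rw [hstep, ih]
    rw [PySem.List.enumerate_cons, List.foldl_cons]
    have hflat : (b :: rest).flatMap id = b ++ rest.flatMap id := by simp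
    rw [hflat, newOf_append, update_append, List.foldl_append]
    refine Prod.ext rfl (Prod.ext ?_ (Prod.ext rfl (Prod.ext ?_ rfl)))
    · simp
    · simp; ring

lemma transFold (ts : List (List (List Int))) (t0 : Int)
    (ibm : PySem.Dict Int (List Int)) (btt : List Int) (itm : PySem.Dict Int (List Int))
    (bid : Int) :
    (PySem.List.enumerate ts t0).foldl aTransStep (ibm, btt, itm, bid) =
      ((PySem.List.enumerate (ts.flatMap id) bid).foldl
         (fun d p => (PySem.List.dedup p.2).foldl (bAppend p.1) d) ibm,
       btt ++ (PySem.List.enumerate ts t0).flatMap (fun tb => tb.2.map (fun _ => tb.1)),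
       (PySem.List.enumerate ts t0).foldl
         (fun d tb => (PySem.List.dedup (tb.2.flatMap id)).foldl (bAppend tb.1) d) itm,
       bid + (ts.flatMap id).length) := by
  induction ts generalizing t0 ibm btt itm bid with
  | nil => simp [PySem.List.enumerate_nil]
  | cons bs rest ih =>
    rw [PySem.List.enumerate_cons, List.foldl_cons]
    have hstep : aTransStep (ibm, btt, itm, bid) (t0, bs) =
        ((PySem.List.enumerate bs bid).foldl
           (fun d p => (PySem.List.dedup p.2).foldl (bAppend p.1) d) ibm,
         btt ++ bs.map (fun _ => t0),
         (PySem.List.dedup (bs.flatMap id)).foldl (bAppend t0) itm,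
         bid + bs.length) := by
      simp [aTransStep, basketFold, newOf_nil]
    rw [hstep, ih]
    have hflat : (bs :: rest).flatMap id = bs ++ rest.flatMap id := by simp
    rw [hflat, PySem.List.enumerate_append, List.foldl_append]
    refine Prod.ext rfl (Prod.ext ?_ (Prod.ext rfl ?_))
    · simp
    · simp; ring

-- ===== VERDICT (by name: the statement is the Claim_ definition above) =====
theorem compute_item_basket_map_spec : Claim_equal_compute_item_basket_map := by
  intro ts _
  unfold Spec_compute_item_basket_map compute_item_basket_map compute_item_basket_map_alt
  rw [transFold]
  simp
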